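-- pv_equiv track=rewrite | github.com/mortennp/mooc | UCSD_Bioinformatics/BioinformaticsSpyder/BioinformaticsI/DnaReplication/FrequentWordsWithMismatches_1G.py | build_translation_table
-- ===== SOURCE A (Python) =====
-- import copy
--
-- def build_translation_table(n):
--     map = {}
--     map['A'] = 'T'
--     map['T'] = 'A'
--     map['G'] = 'C'
--     map['C'] = 'G'
--
--     tt = copy.deepcopy(map)
--
--     for i in range(1, n):
--         buffer = copy.deepcopy(tt)
--         for strand, strandComplement in buffer.items():
--             for nucleotide, nucleotideComplement in map.items():
--                 newStrand = strand + nucleotide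
--                 newStrandComplement = strandComplement + nucleotideComplement
--                 tt[newStrand] = newStrandComplement
--
--     return tt
-- ===== SOURCE B (Python) =====
-- import itertools
--
--
-- def build_translation_table(n):
--     comp = str.maketrans('ATGC', 'TACG')
--     tt = {}
--     for length in range(1, max(n, 1) + 1):
--         for t in itertools.product('ATGC', repeat=length):
--             strand = ''.join(t)
--             tt[strand] = strand.translate(comp)
--     return tt
-- ===== Notes on version B (the rewrite author's own statement) =====
-- stated objective: idiomatic
-- what changed: A grows the dict incrementally by appending one nucleotide to every strand already stored (re-inserting all shorter strands each round); B directly enumerates all strands of each length 1..max(n,1) with itertools.product and maps each to its complement via a str.maketrans character table.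
import Mathlib
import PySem

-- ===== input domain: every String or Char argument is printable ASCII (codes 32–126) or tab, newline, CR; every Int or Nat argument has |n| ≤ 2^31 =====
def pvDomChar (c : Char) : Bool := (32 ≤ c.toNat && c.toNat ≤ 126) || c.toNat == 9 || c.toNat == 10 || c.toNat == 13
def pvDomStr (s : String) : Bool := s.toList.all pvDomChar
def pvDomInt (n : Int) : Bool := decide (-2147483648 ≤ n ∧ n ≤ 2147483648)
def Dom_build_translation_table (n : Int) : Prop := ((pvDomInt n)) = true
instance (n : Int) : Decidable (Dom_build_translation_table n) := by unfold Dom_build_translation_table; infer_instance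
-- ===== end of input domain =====

-- B replaces A's incremental "grow every stored strand by one nucleotide" dict accumulation by
-- direct product enumeration of all strands of each length with a per-character complement table
-- (objective: idiomatic; same values and insertion order).

-- ===== PORT A =====
def build_translation_table (n : Int) : List (String × String) :=
  let map : PySem.Dict String String :=
    ((((PySem.Dict.empty).insert "A" "T").insert "T" "A").insert "G" "C").insert "C" "G"
  let tt := map
  ((PySem.List.pyRange 1 n).foldl (fun tt _i =>
      let buffer := tt
      buffer.items.foldl (fun tt sc =>
        map.items.foldl (fun tt nc =>
          tt.insert (sc.1 ++ nc.1) (sc.2 ++ nc.2)) tt) tt) tt).items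

-- ===== PORT B =====
-- itertools.product('ATGC', repeat=L), each tuple joined to a string (last position varies fastest)
def prodATGC : Nat → List String
  | 0 => [""]
  | l + 1 => (prodATGC l).flatMap (fun s => ("ATGC".toList).map (fun c => s ++ String.ofList [c]))

def build_translation_table_alt (n : Int) : List (String × String) :=
  -- comp = str.maketrans('ATGC', 'TACG'); strand.translate(comp) maps each char through it
  let comp : PySem.Dict Char Char :=
    ((((PySem.Dict.empty).insert 'A' 'T').insert 'T' 'A').insert 'G' 'C').insert 'C' 'G'
  ((PySem.List.pyRange 1 (max n 1 + 1)).foldl (fun tt L =>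
      (prodATGC L.toNat).foldl (fun tt strand =>
        tt.insert strand (String.ofList (strand.toList.map (fun c => comp.getD c c)))) tt)
    PySem.Dict.empty).items

-- ===== PRECONDITION & SPEC =====
def Spec_build_translation_table (n : Int) (out : List (String × String)) : Prop := out = build_translation_table_alt n
instance (n : Int) (out : List (String × String)) : Decidable (Spec_build_translation_table n out) := by unfold Spec_build_translation_table; infer_instance

-- ===== CLAIM (what is proved, stated in full; the proofs are below) =====
def Claim_equal_build_translation_table : Prop := ∀ (n : Int), Dom_build_translation_table n → Spec_build_translation_table n (build_translation_table n)

-- ===== LEMMAS AND PROOFS =====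

def pvMapDict : PySem.Dict String String :=
  ((((PySem.Dict.empty).insert "A" "T").insert "T" "A").insert "G" "C").insert "C" "G"

def pvComp : PySem.Dict Char Char :=
  ((((PySem.Dict.empty).insert 'A' 'T').insert 'T' 'A').insert 'G' 'C').insert 'C' 'G'

def pvTr (s : String) : String := String.ofList (s.toList.map (fun c => pvComp.getD c c))

def pvBase : List (String × String) := [("A","T"),("T","A"),("G","C"),("C","G")]

def pvChildren (p : String × String) : List (String × String) :=
  pvBase.map (fun q => (p.1 ++ q.1, p.2 ++ q.2))

def pvLevel : Nat → List (String × String)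
  | 0 => pvBase
  | k + 1 => (pvLevel k).flatMap pvChildren

def pvLevels : Nat → List (String × String)
  | 0 => []
  | k + 1 => pvLevels k ++ pvLevel k

lemma pvTr_append (s t : String) : pvTr (s ++ t) = pvTr s ++ pvTr t := by
  simp [pvTr, String.toList_append, String.ofList_append]

lemma pvLevel_shape {k : Nat} {p : String × String} (hp : p ∈ pvLevel k) :
    p.1.toList.length = k + 1 ∧ p.2 = pvTr p.1 := by
  induction k generalizing p with
  | zero =>
    simp [pvLevel, pvBase] at hp
    rcases hp with rfl | rfl | rfl | rfl <;> exact ⟨by decide, by decide⟩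
  | succ k ih =>
    simp only [pvLevel, List.mem_flatMap] at hp
    obtain ⟨q, hq, hpq⟩ := hp
    simp only [pvChildren, pvBase, List.mem_map] at hpq
    obtain ⟨hl, hv⟩ := ih hq
    rcases hpq with ⟨r, hr, rfl⟩
    constructor
    · simp only [String.toList_append, List.length_append, hl]
      fin_cases hr <;> simp
    · rw [pvTr_append, ← hv]
      fin_cases hr <;> simp <;> decide

lemma mem_pvLevels {k : Nat} {p : String × String} :
    p ∈ pvLevels k ↔ ∃ j, j < k ∧ p ∈ pvLevel j := by
  induction k with
  | zero => simp [pvLevels]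
  | succ k ih =>
    simp only [pvLevels, List.mem_append, ih]
    constructor
    · rintro (⟨j, hj, hp⟩ | hp)
      · exact ⟨j, by omega, hp⟩
      · exact ⟨k, by omega, hp⟩
    · rintro ⟨j, hj, hp⟩
      rcases Nat.lt_succ_iff_lt_or_eq.mp hj with h | rfl
      · exact Or.inl ⟨j, h, hp⟩
      · exact Or.inr hp

lemma str_append_cancel {p x y : String} (h : p ++ x = p ++ y) : x = y := by
  have h' := congrArg String.toList h
  simp only [String.toList_append] at h'
  exact String.toList_inj.mp (List.append_cancel_left h')

lemma pvKeys_nodup (k : Nat) : ((pvLevel k).map Prod.fst).Nodup := by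
  induction k with
  | zero => decide
  | succ k ih =>
    simp only [pvLevel, List.map_flatMap]
    rw [List.nodup_flatMap]
    constructor
    · intro p _
      have hrw : (List.map Prod.fst (pvChildren p))
           = List.map (fun s => p.1 ++ s) (pvBase.map Prod.fst) := by
        simp [pvChildren, List.map_map, Function.comp]
      rw [hrw]
      exact List.Nodup.map (fun _ _ h => str_append_cancel h) (by decide)
    · have hpw : List.Pairwise (fun p q : String × String => p.1 ≠ q.1) (pvLevel k) :=
        List.pairwise_map.mp ih
      refine hpw.imp_of_mem ?_
      intro p q hp hq hne x hx hy
      simp only [pvChildren, List.mem_map] at hx hy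
      obtain ⟨r, hr, rfl⟩ := hx
      obtain ⟨r', hr', heq⟩ := hy
      obtain ⟨a, ha, rfl⟩ := hr
      obtain ⟨a', ha', rfl⟩ := hr'
      have h1 := (pvLevel_shape hp).1
      have h2 := (pvLevel_shape hq).1
      have h' := congrArg String.toList heq
      simp only [String.toList_append] at h'
      exact hne (String.toList_inj.mp (List.append_inj_left h'.symm (by omega)))

lemma pvLevels_keys_nodup (k : Nat) : ((pvLevels k).map Prod.fst).Nodup := by
  induction k with
  | zero => simp [pvLevels]
  | succ k ih =>
    simp only [pvLevels, List.map_append]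
    rw [List.nodup_append]
    refine ⟨ih, pvKeys_nodup k, ?_⟩
    intro x hx y hy hxy
    obtain ⟨p, hp, rfl⟩ := List.mem_map.mp hx
    obtain ⟨q, hq, rfl⟩ := List.mem_map.mp hy
    obtain ⟨j, hj, hpj⟩ := mem_pvLevels.mp hp
    have h1 := (pvLevel_shape hpj).1
    have h2 := (pvLevel_shape hq).1
    have := congrArg (fun s => s.toList.length) hxy
    simp only [h1, h2] at this
    omega

lemma prodATGC_eq (k : Nat) : prodATGC (k + 1) = (pvLevel k).map Prod.fst := by
  induction k with
  | zero => decide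
  | succ k ih =>
    have hfun : ∀ p : String × String,
        ("ATGC".toList).map (fun c => p.1 ++ String.ofList [c]) = (pvChildren p).map Prod.fst := by
      intro p
      simp [pvChildren, pvBase, show "ATGC".toList = ['A','T','G','C'] from by decide,
        show String.ofList ['A'] = "A" from by decide, show String.ofList ['T'] = "T" from by decide,
        show String.ofList ['G'] = "G" from by decide, show String.ofList ['C'] = "C" from by decide]
    show (prodATGC (k+1)).flatMap _ = _
    rw [ih]
    rw [show pvLevel (k+1) = (pvLevel k).flatMap pvChildren from rfl, List.map_flatMap,
      List.flatMap_map]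
    exact List.flatMap_congr (fun p _ => hfun p)

lemma insert_self {d : PySem.Dict String String} {k : String} {v : String}
    (h : d.get? k = some v) (hn : d.keys.Nodup) : d.insert k v = d := by
  apply PySem.Dict.ext
  have hc : d.contains k = true := by
    rw [PySem.Dict.contains_eq_isSome_get?, h]; rfl
  rw [PySem.Dict.items_insert_of_contains _ _ hc]
  have : ∀ p ∈ d.items, (if (p.1 == k) = true then (k, v) else p) = p := by
    intro p hp
    split_ifs with hk
    · have hk' : p.1 = k := by simpa using hk
      have h2 := PySem.Dict.get?_of_mem_items d hp hn
      rw [hk', h] at h2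
      obtain ⟨p1, p2⟩ := p
      simp only at hk'
      subst hk'
      rw [Option.some_inj.mp h2]
    · rfl
  simpa using List.map_congr_left this

def pvBodyA (tt : PySem.Dict String String) : PySem.Dict String String :=
  tt.items.foldl (fun tt sc =>
    pvMapDict.items.foldl (fun tt nc =>
      tt.insert (sc.1 ++ nc.1) (sc.2 ++ nc.2)) tt) tt

lemma pvMapDict_items : pvMapDict.items = pvBase := by decide

-- inner fold over pvMapDict.items IS folding inserts of pvChildren sc
lemma inner_eq (d : PySem.Dict String String) (sc : String × String) :
    pvMapDict.items.foldl (fun tt nc => tt.insert (sc.1 ++ nc.1) (sc.2 ++ nc.2)) d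
      = pvBase.foldl (fun tt nc => tt.insert (sc.1 ++ nc.1) (sc.2 ++ nc.2)) d := by
  rw [pvMapDict_items]

-- phase 1: every child already present with the same value; dict unchanged
lemma phase1 (l : List (String × String)) (d : PySem.Dict String String)
    (hn : d.keys.Nodup)
    (hpres : ∀ p ∈ l, ∀ q ∈ pvChildren p, (q.1, q.2) ∈ d.items) :
    l.foldl (fun tt sc =>
        pvMapDict.items.foldl (fun tt nc => tt.insert (sc.1 ++ nc.1) (sc.2 ++ nc.2)) tt) d = d := by
  induction l with
  | nil => rfl
  | cons p l ih =>
    have hstep : pvMapDict.items.foldl (fun tt nc => tt.insert (p.1 ++ nc.1) (p.2 ++ nc.2)) d = d := by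
      rw [inner_eq]
      have h4 : ∀ q ∈ pvBase, (p.1 ++ q.1, p.2 ++ q.2) ∈ d.items := by
        intro q hq
        exact hpres p (List.mem_cons_self ..) _ (List.mem_map_of_mem hq)
      -- unfold the 4-element fold
      have e1 := insert_self (PySem.Dict.get?_of_mem_items d
        (show (p.1 ++ "A", p.2 ++ "T") ∈ d.items by simpa using h4 ("A","T") (by decide)) hn) hn
      have e2 := insert_self (PySem.Dict.get?_of_mem_items d
        (show (p.1 ++ "T", p.2 ++ "A") ∈ d.items by simpa using h4 ("T","A") (by decide)) hn) hn
      have e3 := insert_self (PySem.Dict.get?_of_mem_items d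
        (show (p.1 ++ "G", p.2 ++ "C") ∈ d.items by simpa using h4 ("G","C") (by decide)) hn) hn
      have e4 := insert_self (PySem.Dict.get?_of_mem_items d
        (show (p.1 ++ "C", p.2 ++ "G") ∈ d.items by simpa using h4 ("C","G") (by decide)) hn) hn
      simp only [pvBase, List.foldl_cons, List.foldl_nil]
      rw [e1, e2, e3, e4]
    simp only [List.foldl_cons, hstep]
    exact ih (fun p hp => hpres p (List.mem_cons_of_mem _ hp))

-- phase 2: all children fresh; items appended in order
lemma phase2 (l : List (String × String)) (d : PySem.Dict String String)
    (hfresh : ∀ p ∈ l, ∀ q ∈ pvChildren p, d.contains q.1 = false)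
    (hnd : ((l.flatMap pvChildren).map Prod.fst).Nodup) :
    (l.foldl (fun tt sc =>
        pvMapDict.items.foldl (fun tt nc => tt.insert (sc.1 ++ nc.1) (sc.2 ++ nc.2)) tt) d).items
      = d.items ++ l.flatMap pvChildren := by
  induction l generalizing d with
  | nil => simp
  | cons p l ih =>
    simp only [List.flatMap_cons, List.map_append] at hnd
    have hnd1 : ((pvChildren p).map Prod.fst).Nodup := (List.nodup_append.mp hnd).1
    have hnd2 : ((l.flatMap pvChildren).map Prod.fst).Nodup := (List.nodup_append.mp hnd).2.1
    have hdisj := (List.nodup_append.mp hnd).2.2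
    have hstep : (pvMapDict.items.foldl (fun tt nc => tt.insert (p.1 ++ nc.1) (p.2 ++ nc.2)) d).items
        = d.items ++ pvChildren p := by
      rw [inner_eq]
      have := PySem.Dict.items_foldl_insert_fresh pvBase
        (fun q => p.1 ++ q.1) (fun q => p.2 ++ q.2) d
        (fun q hq => hfresh p (List.mem_cons_self ..) _ (List.mem_map_of_mem hq))
        (by simpa [pvChildren, List.map_map, Function.comp] using hnd1)
      simpa [pvChildren, List.map_map, Function.comp] using this
    simp only [List.foldl_cons]
    set d' := pvMapDict.items.foldl (fun tt nc => tt.insert (p.1 ++ nc.1) (p.2 ++ nc.2)) d with hd'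
    have hkeys' : d'.keys = d.keys ++ (pvChildren p).map Prod.fst := by
      show d'.items.map Prod.fst = _
      rw [hstep, List.map_append]
      rfl
    have ihres := ih d' ?_ hnd2
    · rw [ihres, hstep, List.append_assoc, List.flatMap_cons]
    · intro r hr q hq
      rw [PySem.Dict.contains_eq_decide_mem_keys, hkeys']
      simp only [List.mem_append, decide_eq_false_iff_not, not_or]
      constructor
      · have := hfresh r (List.mem_cons_of_mem _ hr) q hq
        rw [PySem.Dict.contains_eq_decide_mem_keys] at this
        simpa using this
      · intro hmem
        exact hdisj q.1 hmem q.1 (List.mem_map_of_mem (List.mem_flatMap.mpr ⟨r, hr, hq⟩)) rfl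

lemma pvBodyA_step (k : Nat) :
    pvBodyA (PySem.Dict.mk (pvLevels (k + 1))) = PySem.Dict.mk (pvLevels (k + 2)) := by
  apply PySem.Dict.ext
  have hkeysnd : (PySem.Dict.mk (pvLevels k ++ pvLevel k)).keys.Nodup := by
    show ((pvLevels k ++ pvLevel k).map Prod.fst).Nodup
    simpa [pvLevels] using pvLevels_keys_nodup (k+1)
  have hpres : ∀ p ∈ pvLevels k, ∀ q ∈ pvChildren p,
      (q.1, q.2) ∈ (PySem.Dict.mk (pvLevels k ++ pvLevel k)).items := by
    intro p hp q hq
    obtain ⟨j, hj, hpj⟩ := mem_pvLevels.mp hp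
    have hq' : q ∈ pvLevel (j+1) := by
      show q ∈ (pvLevel j).flatMap pvChildren
      exact List.mem_flatMap.mpr ⟨p, hpj, hq⟩
    show (q.1, q.2) ∈ pvLevels k ++ pvLevel k
    have : q ∈ pvLevels (k+1) := mem_pvLevels.mpr ⟨j+1, by omega, hq'⟩
    simpa [pvLevels] using this
  have hfresh : ∀ p ∈ pvLevel k, ∀ q ∈ pvChildren p,
      (PySem.Dict.mk (pvLevels k ++ pvLevel k)).contains q.1 = false := by
    intro p hp q hq
    rw [PySem.Dict.contains_eq_decide_mem_keys]
    simp only [decide_eq_false_iff_not]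
    intro hmem
    have hmem' : q.1 ∈ (pvLevels (k+1)).map Prod.fst := by simpa [pvLevels] using hmem
    obtain ⟨r, hr, hrq⟩ := List.mem_map.mp hmem'
    obtain ⟨j, hj, hrj⟩ := mem_pvLevels.mp hr
    have h1 := (pvLevel_shape hrj).1
    have hq' : q ∈ pvLevel (k+1) := List.mem_flatMap.mpr ⟨p, hp, hq⟩
    have h2 := (pvLevel_shape hq').1
    have := congrArg (fun s => s.toList.length) hrq
    simp only [h1, h2] at this
    omega
  have hnd : (((pvLevel k).flatMap pvChildren).map Prod.fst).Nodup := by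
    simpa [pvLevel] using pvKeys_nodup (k+1)
  show (List.foldl (fun tt sc =>
      pvMapDict.items.foldl (fun tt nc => tt.insert (sc.1 ++ nc.1) (sc.2 ++ nc.2)) tt)
      (PySem.Dict.mk (pvLevels k ++ pvLevel k)) (pvLevels k ++ pvLevel k)).items = pvLevels (k + 2)
  rw [List.foldl_append]
  rw [phase1 (pvLevels k) _ hkeysnd hpres]
  rw [phase2 (pvLevel k) _ hfresh hnd]
  show (pvLevels k ++ pvLevel k) ++ (pvLevel k).flatMap pvChildren = _
  rw [show pvLevels (k+2) = (pvLevels k ++ pvLevel k) ++ pvLevel (k+1) from rfl]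
  rfl


lemma B_level (k : Nat) (d : PySem.Dict String String) (hd : d.items = pvLevels k) :
    ((prodATGC (k + 1)).foldl (fun tt s => tt.insert s (pvTr s)) d).items = pvLevels (k + 1) := by
  have hfresh : ∀ s ∈ prodATGC (k + 1), d.contains s = false := by
    intro s hs
    rw [prodATGC_eq] at hs
    obtain ⟨p, hp, rfl⟩ := List.mem_map.mp hs
    have h1 := (pvLevel_shape hp).1
    rw [PySem.Dict.contains_eq_decide_mem_keys]
    simp only [decide_eq_false_iff_not]
    intro hmem
    have hmem' : p.1 ∈ (pvLevels k).map Prod.fst := by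
      have : p.1 ∈ d.items.map Prod.fst := hmem
      rwa [hd] at this
    obtain ⟨q, hq, hqp⟩ := List.mem_map.mp hmem'
    obtain ⟨j, hj, hqj⟩ := mem_pvLevels.mp hq
    have h2 := (pvLevel_shape hqj).1
    have := congrArg (fun s => s.toList.length) hqp
    simp only [h1, h2] at this
    omega
  have hnd : ((prodATGC (k+1)).map (fun s => s)).Nodup := by
    rw [prodATGC_eq]
    simpa using pvKeys_nodup k
  have := PySem.Dict.items_foldl_insert_fresh (prodATGC (k+1)) (fun s => s) pvTr d
    (by simpa using hfresh) hnd
  rw [this, hd]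
  show pvLevels k ++ _ = pvLevels k ++ pvLevel k
  rw [prodATGC_eq, List.map_map]
  congr 1
  have : ∀ p ∈ pvLevel k, ((fun s => (s, pvTr s)) ∘ Prod.fst) p = p := by
    intro p hp
    have := (pvLevel_shape hp).2
    simp [Function.comp, ← this]
  rw [List.map_congr_left this]
  simp

lemma A_outer (j : Nat) :
    (PySem.List.pyRange 1 (1 + (j : Int))).foldl (fun tt _i => pvBodyA tt) pvMapDict
      = PySem.Dict.mk (pvLevels (j + 1)) := by
  induction j with
  | zero =>
    rw [show ((1 : Int) + (0 : Nat) : Int) = 1 by norm_num, PySem.List.pyRange_one_eq_nil le_rfl]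
    apply PySem.Dict.ext
    decide
  | succ j ih =>
    rw [show ((1 : Int) + ((j + 1 : Nat)) : Int) = (1 + (j : Int)) + 1 by push_cast; ring,
      PySem.List.pyRange_one_succ_right (by omega), List.foldl_append]
    rw [ih]
    simpa using pvBodyA_step j

lemma B_outer (j : Nat) :
    ((PySem.List.pyRange 1 (2 + (j : Int))).foldl (fun tt L =>
        (prodATGC L.toNat).foldl (fun tt s => tt.insert s (pvTr s)) tt)
      PySem.Dict.empty).items = pvLevels (j + 1) := by
  induction j with
  | zero =>
    rw [show ((2 : Int) + (0 : Nat) : Int) = 2 by norm_num,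
      show PySem.List.pyRange 1 2 = [1] from by decide]
    simp only [List.foldl_cons, List.foldl_nil]
    exact B_level 0 PySem.Dict.empty rfl
  | succ j ih =>
    rw [show ((2 : Int) + ((j + 1 : Nat)) : Int) = (2 + (j : Int)) + 1 by push_cast; ring,
      PySem.List.pyRange_one_succ_right (by omega), List.foldl_append]
    simp only [List.foldl_cons, List.foldl_nil]
    have : ((2 : Int) + (j : Int)).toNat = (j + 1) + 1 := by omega
    rw [this]
    exact B_level (j + 1) _ ih

lemma A_eq (n : Int) : build_translation_table n = pvLevels (max n 1).toNat := by
  show ((PySem.List.pyRange 1 n).foldl (fun tt _i => pvBodyA tt) pvMapDict).items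
      = pvLevels (max n 1).toNat
  rcases (show n ≤ 1 ∨ 1 < n from by omega) with h | h
  · rw [PySem.List.pyRange_one_eq_nil h, show (max n 1).toNat = 1 from by omega]
    decide
  · have hn : n = 1 + (((n - 1).toNat : Nat) : Int) := by omega
    rw [show PySem.List.pyRange 1 n = PySem.List.pyRange 1 (1 + (((n - 1).toNat : Nat) : Int))
      from by rw [← hn], A_outer]
    show pvLevels ((n - 1).toNat + 1) = pvLevels (max n 1).toNat
    congr 1
    omega

lemma B_eq (n : Int) : build_translation_table_alt n = pvLevels (max n 1).toNat := by
  show ((PySem.List.pyRange 1 (max n 1 + 1)).foldl (fun tt L =>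
      (prodATGC L.toNat).foldl (fun tt s => tt.insert s (pvTr s)) tt)
    PySem.Dict.empty).items = pvLevels (max n 1).toNat
  rw [show max n 1 + 1 = 2 + (((max n 1 - 1).toNat : Nat) : Int) from by omega, B_outer]
  congr 1
  omega

-- ===== VERDICT (by name: the statement is the Claim_ definition above) =====
theorem build_translation_table_spec : Claim_equal_build_translation_table := by
  intro n _
  unfold Spec_build_translation_table
  rw [A_eq, B_eq]
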